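-- pv_equiv track=rewrite | github.com/pesicsasa/BLEMAT_public | SRCodeSamples.py | range_extract
-- ===== SOURCE A (Python) =====
-- def range_extract(lst):
--     """ Helper method of generate_beacon_daily_graphs
--        Accepts: List of numbers
--        Returns:  None
--    """
--     lenlst = len(lst)
--     i = 0
--     while i < lenlst:
--         low = lst[i]
--         while i < lenlst - 1 and lst[i] + 1 == lst[i + 1]: i += 1
--         hi = lst[i]
--         if hi - low >= 2:
--             yield (low, hi)
--         elif hi - low == 1:
--             yield (low,)
--             yield (hi,)
--         else:
--             yield (low,)
--         i += 1
-- ===== SOURCE B (Python) =====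
-- def range_extract(lst):
--     # Phase 1: fold the list into maximal consecutive runs [low, hi].
--     runs = []
--     for x in lst:
--         if runs and x == runs[-1][1] + 1:
--             runs[-1][1] = x
--         else:
--             runs.append([x, x])
--     # Phase 2: emit each run in the required tuple shape.
--     for low, hi in runs:
--         if hi - low >= 2:
--             yield (low, hi)
--         elif hi - low == 1:
--             yield (low,)
--             yield (hi,)
--         else:
--             yield (low,)
-- ===== Notes on version B (the rewrite author's own statement) =====
-- stated objective: simpler
-- what changed: Replaced A's index-based while loops (with an inner index-advancing scan) by a two-phase generator: a fold over the elements themselves that accumulates maximal consecutive runs, then a separate emission loop over the runs.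
import Mathlib
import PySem

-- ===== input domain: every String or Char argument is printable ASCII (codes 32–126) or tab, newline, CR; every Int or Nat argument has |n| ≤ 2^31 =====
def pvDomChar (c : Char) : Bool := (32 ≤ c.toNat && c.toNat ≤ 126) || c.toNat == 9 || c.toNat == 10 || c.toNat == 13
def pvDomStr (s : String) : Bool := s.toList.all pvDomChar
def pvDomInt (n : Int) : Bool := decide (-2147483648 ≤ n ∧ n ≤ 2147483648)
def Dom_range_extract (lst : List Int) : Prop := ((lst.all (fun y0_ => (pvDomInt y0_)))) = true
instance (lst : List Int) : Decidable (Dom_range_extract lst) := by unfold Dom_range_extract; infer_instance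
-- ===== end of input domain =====

-- B replaces A's index-based while loops by a two-phase pass (fold into maximal runs, then emit); objective: simpler.


-- ===== PORT A =====
-- inner while: advance i while i < len-1 and lst[i] + 1 == lst[i+1]
def rangeInnerA (lst : List Int) (i : Nat) : Nat :=
  if i < lst.length - 1 ∧ lst.getD i 0 + 1 = lst.getD (i + 1) 0 then
    rangeInnerA lst (i + 1)
  else i
termination_by lst.length - i
decreasing_by omega

theorem rangeInnerA_ge (lst : List Int) (i : Nat) : i ≤ rangeInnerA lst i := by
  fun_induction rangeInnerA lst i with
  | case1 i h ih => omega
  | case2 i h => omega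

-- outer while over index i
def rangeOuterA (lst : List Int) (i : Nat) : List (List Int) :=
  if h : i < lst.length then
    let low := lst.getD i 0
    let j := rangeInnerA lst i
    let hi := lst.getD j 0
    (if hi - low ≥ 2 then [[low, hi]]
     else if hi - low = 1 then [[low], [hi]]
     else [[low]]) ++ rangeOuterA lst (j + 1)
  else []
termination_by lst.length - i
decreasing_by have := rangeInnerA_ge lst i; omega

def range_extract (lst : List Int) : List (List Int) := rangeOuterA lst 0

-- ===== PORT B =====
-- phase 1: fold that accumulates maximal consecutive runs (runs[-1] extension / new run)
def runStep (runs : List (Int × Int)) (x : Int) : List (Int × Int) :=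
  match runs.getLast? with
  | some (lo, hi) => if x = hi + 1 then runs.dropLast ++ [(lo, x)] else runs ++ [(x, x)]
  | none => [(x, x)]

-- phase 2: emission shape for one run
def emitRun : Int × Int → List (List Int)
  | (low, hi) =>
    if hi - low ≥ 2 then [[low, hi]]
    else if hi - low = 1 then [[low], [hi]]
    else [[low]]

def range_extract_alt (lst : List Int) : List (List Int) :=
  (lst.foldl runStep []).flatMap emitRun

-- ===== PRECONDITION & SPEC =====
def Spec_range_extract (lst : List Int) (out : List (List Int)) : Prop := out = range_extract_alt lst
instance (lst : List Int) (out : List (List Int)) : Decidable (Spec_range_extract lst out) := by unfold Spec_range_extract; infer_instance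

-- ===== CLAIM (what is proved, stated in full; the proofs are below) =====
def Claim_equal_range_extract : Prop := ∀ (lst : List Int), Dom_range_extract lst → Spec_range_extract lst (range_extract lst)

-- ===== LEMMAS AND PROOFS =====

-- canonical run decomposition, head-first
def takeRun (cur : Int) : List Int → Int × List Int
  | [] => (cur, [])
  | x :: xs => if x = cur + 1 then takeRun x xs else (cur, x :: xs)

theorem takeRun_len (cur : Int) (xs : List Int) : (takeRun cur xs).2.length ≤ xs.length := by
  induction xs generalizing cur with
  | nil => simp [takeRun]
  | cons x xs ih =>
    simp only [takeRun]
    split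
    · exact le_trans (ih x) (Nat.le_succ _)
    · simp

def runsOf : List Int → List (Int × Int)
  | [] => []
  | x :: xs =>
    let p := takeRun x xs
    (x, p.1) :: runsOf p.2
termination_by l => l.length
decreasing_by have := takeRun_len x xs; simpa using Nat.lt_succ_of_le this

-- ---- B equals the canonical decomposition ----
theorem foldl_runStep_eq (xs : List Int) (rs : List (Int × Int)) (lo hi : Int) :
    xs.foldl runStep (rs ++ [(lo, hi)]) =
      rs ++ (lo, (takeRun hi xs).1) :: runsOf (takeRun hi xs).2 := by
  induction xs generalizing rs lo hi with
  | nil => simp [takeRun, runsOf]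
  | cons x xs ih =>
    simp only [List.foldl_cons, takeRun]
    have hlast : runStep (rs ++ [(lo, hi)]) x =
        if x = hi + 1 then rs ++ [(lo, x)] else (rs ++ [(lo, hi)]) ++ [(x, x)] := by
      simp [runStep]
    rw [hlast]
    split
    · exact ih rs lo x
    · rw [ih (rs ++ [(lo, hi)]) x x]
      simp [runsOf]

theorem alt_eq_runsOf (lst : List Int) :
    range_extract_alt lst = (runsOf lst).flatMap emitRun := by
  cases lst with
  | nil => simp [range_extract_alt, runsOf]
  | cons x xs =>
    have : (x :: xs).foldl runStep [] = runsOf (x :: xs) := by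
      have h := foldl_runStep_eq xs ([] : List (Int × Int)) x x
      simpa [runStep, runsOf] using h
    simp [range_extract_alt, this]

-- ---- A equals the canonical decomposition ----
theorem inner_spec (lst : List Int) (i : Nat) (h : i < lst.length) :
    rangeInnerA lst i < lst.length ∧
    takeRun (lst.getD i 0) (lst.drop (i + 1)) =
      (lst.getD (rangeInnerA lst i) 0, lst.drop (rangeInnerA lst i + 1)) := by
  fun_induction rangeInnerA lst i with
  | case1 i hcond ih =>
    have hi1 : i + 1 < lst.length := by omega
    have hdrop : lst.drop (i + 1) = lst.getD (i + 1) 0 :: lst.drop (i + 2) := by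
      rw [List.drop_eq_getElem_cons hi1, List.getD_eq_getElem _ _ hi1]
    rw [hdrop]
    simp only [takeRun]
    rw [if_pos (by omega)]
    exact ih hi1
  | case2 i hcond =>
    refine ⟨h, ?_⟩
    by_cases hlast : i + 1 < lst.length
    · have hne : lst.getD (i + 1) 0 ≠ lst.getD i 0 + 1 := by
        intro he
        exact hcond ⟨by omega, he.symm⟩
      have hdrop : lst.drop (i + 1) = lst.getD (i + 1) 0 :: lst.drop (i + 2) := by
        rw [List.drop_eq_getElem_cons hlast, List.getD_eq_getElem _ _ hlast]
      rw [hdrop]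
      simp only [takeRun]
      rw [if_neg hne, ← hdrop]
    · have hnil : lst.drop (i + 1) = [] := List.drop_eq_nil_of_le (by omega)
      rw [hnil]
      simp [takeRun]

theorem outer_spec (lst : List Int) (i : Nat) :
    rangeOuterA lst i = (runsOf (lst.drop i)).flatMap emitRun := by
  fun_induction rangeOuterA lst i with
  | case1 i h low j hi ih =>
    obtain ⟨hj, htake⟩ := inner_spec lst i h
    have hdrop : lst.drop i = lst.getD i 0 :: lst.drop (i + 1) := by
      rw [List.drop_eq_getElem_cons h, List.getD_eq_getElem _ _ h]
    rw [hdrop]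
    simp only [runsOf, htake]
    simp only [List.flatMap_cons]
    rw [ih]
    simp [emitRun, low, j, hi]
  | case2 i h =>
    have : lst.drop i = [] := List.drop_eq_nil_of_le (by omega)
    simp [this, runsOf]

-- ===== VERDICT (by name: the statement is the Claim_ definition above) =====
theorem range_extract_spec : Claim_equal_range_extract := by
  intro lst _
  unfold Spec_range_extract
  rw [alt_eq_runsOf, range_extract, outer_spec]
  simp
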